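-- pv_equiv track=rewrite | github.com/BoCo-456/intro_ai_hw3 | ex3.py | heuristic_MOM
-- ===== SOURCE A (Python) =====
-- from typing import Any, List, Optional, Tuple
-- from collections import Counter, defaultdict
--
-- def heuristic_MOM(clauses: list, assignment: dict) -> Optional[str]:
--     """
--     Maximum Occurrences in Minimum Length Clauses.
--     Optimized to avoid list allocations and unnecessary looping.
--     """
--     min_len = float('inf')
--     counts = defaultdict(int)
--
--     for clause in clauses:
--         # 1. Check if satisfied & count unassigned in one pass
--         # This avoids creating a list of unassigned vars unless needed
--         unassigned = []
--         is_satisfied = False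
--
--         for var, polarity in clause:
--             if var in assignment:
--                 if assignment[var] == polarity:
--                     is_satisfied = True
--                     break
--             else:
--                 unassigned.append(var)
--
--         if is_satisfied:
--             continue
--
--         # 2. Process active clause
--         curr_len = len(unassigned)
--         if curr_len == 0:
--             continue  # Conflict (should be handled by unit_prop, but safety first)
--
--         if curr_len < min_len:
--             min_len = curr_len
--             counts.clear()  # Reset counts for new minimum length
--             for var in unassigned:
--                 counts[var] += 1
--         elif curr_len == min_len:
--             for var in unassigned:
--                 counts[var] += 1
--
--     if not counts:
--         return None
--     return max(counts, key=counts.get)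
-- ===== SOURCE B (Python) =====
-- from typing import Optional
-- from collections import Counter
--
--
-- def heuristic_MOM(clauses: list, assignment: dict) -> Optional[str]:
--     """Two-phase MOM: collect active clauses' unassigned vars and the minimum
--     length first, then count variables of the minimum-length clauses."""
--     active = []
--     min_len = None
--     for clause in clauses:
--         if any(var in assignment and assignment[var] == polarity
--                for var, polarity in clause):
--             continue  # satisfied
--         unassigned = [var for var, _ in clause if var not in assignment]
--         if not unassigned:
--             continue  # conflict clause
--         active.append(unassigned)
--         if min_len is None or len(unassigned) < min_len:
--             min_len = len(unassigned)
--     counts = Counter()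
--     for vars_ in active:
--         if len(vars_) == min_len:
--             counts.update(vars_)
--     if not counts:
--         return None
--     return max(counts, key=counts.get)
-- ===== Notes on version B (the rewrite author's own statement) =====
-- stated objective: simpler
-- what changed: Replaces A's single-pass state machine that resets a defaultdict whenever a new minimum clause length appears with two plain phases: first collect each active clause's unassigned-variable list while tracking the minimum length, then count variables only of the minimum-length clauses with a Counter.
import Mathlib
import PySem

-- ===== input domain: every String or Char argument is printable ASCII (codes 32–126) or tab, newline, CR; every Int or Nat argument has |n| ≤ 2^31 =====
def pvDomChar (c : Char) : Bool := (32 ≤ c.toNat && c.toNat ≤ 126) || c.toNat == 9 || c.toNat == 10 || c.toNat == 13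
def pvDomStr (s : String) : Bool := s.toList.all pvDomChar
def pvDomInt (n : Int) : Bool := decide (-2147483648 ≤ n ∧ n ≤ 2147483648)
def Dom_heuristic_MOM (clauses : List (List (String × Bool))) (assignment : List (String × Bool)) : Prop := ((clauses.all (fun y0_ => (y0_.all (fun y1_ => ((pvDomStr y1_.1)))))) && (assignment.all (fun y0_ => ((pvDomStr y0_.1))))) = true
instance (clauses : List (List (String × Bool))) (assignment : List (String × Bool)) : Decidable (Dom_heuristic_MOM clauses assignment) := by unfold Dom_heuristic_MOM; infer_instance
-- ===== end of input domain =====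

-- B replaces A's reset-on-new-minimum single-pass state machine by two plain phases
-- (collect active clauses' unassigned vars + minimum length, then count only the
-- minimum-length clauses) — simpler decomposition, same cost.


-- shared primitive helpers (dict lookup; 'counts[v] += 1' loop; 'max(counts, key=counts.get)')
def pvAssignGet (assignment : List (String × Bool)) (v : String) : Option Bool :=
  (PySem.Dict.mk assignment).get? v

def pvBump (d : PySem.Dict String Int) (l : List String) : PySem.Dict String Int :=
  l.foldl (fun d v => d.modify v 0 (· + 1)) d

def pvPickMax (d : PySem.Dict String Int) : Option String :=
  if d.items.isEmpty then none
  else PySem.List.max? d.keys (fun k => d.getD k 0)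

-- ===== PORT A =====
-- inner 'for var, polarity in clause' loop with break: returns (unassigned, is_satisfied)
def amomScan (assignment : List (String × Bool)) :
    List (String × Bool) → List String → (List String × Bool)
  | [], un => (un, false)
  | (var, pol) :: rest, un =>
      match pvAssignGet assignment var with
      | some b => if b = pol then (un, true) else amomScan assignment rest un
      | none => amomScan assignment rest (un ++ [var])

-- body of A's outer loop; min_len = none models float('inf')
def amomStep (assignment : List (String × Bool))
    (st : Option Nat × PySem.Dict String Int) (clause : List (String × Bool)) :
    Option Nat × PySem.Dict String Int :=
  let (un, sat) := amomScan assignment clause []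
  if sat then st
  else if un.length = 0 then st
  else
    match st.1 with
    | none => (some un.length, pvBump PySem.Dict.empty un)
    | some m =>
        if un.length < m then (some un.length, pvBump PySem.Dict.empty un)
        else if un.length = m then (some m, pvBump st.2 un)
        else st

def heuristic_MOM (clauses : List (List (String × Bool))) (assignment : List (String × Bool)) : Option String :=
  let st := clauses.foldl (amomStep assignment) (none, PySem.Dict.empty)
  pvPickMax st.2

-- ===== PORT B =====
-- phase 1 loop body: skip satisfied/conflict clauses, append unassigned list, track min
def bmomCollect (assignment : List (String × Bool))
    (st : List (List String) × Option Nat) (clause : List (String × Bool)) :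
    List (List String) × Option Nat :=
  if clause.any (fun p => (pvAssignGet assignment p.1).any (fun b => b = p.2)) then st
  else
    let un := (clause.filter (fun p => (pvAssignGet assignment p.1).isNone)).map (·.1)
    if un.isEmpty then st
    else
      (st.1 ++ [un],
       match st.2 with
       | none => some un.length
       | some m => if un.length < m then some un.length else some m)

def heuristic_MOM_alt (clauses : List (List (String × Bool))) (assignment : List (String × Bool)) : Option String :=
  let st := clauses.foldl (bmomCollect assignment) ([], none)
  let counts := st.1.foldl (fun d vs => if some vs.length = st.2 then pvBump d vs else d) PySem.Dict.empty
  pvPickMax counts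

-- ===== PRECONDITION & SPEC =====
def Spec_heuristic_MOM (clauses : List (List (String × Bool))) (assignment : List (String × Bool)) (out : Option String) : Prop := out = heuristic_MOM_alt clauses assignment
instance (clauses : List (List (String × Bool))) (assignment : List (String × Bool)) (out : Option String) : Decidable (Spec_heuristic_MOM clauses assignment out) := by unfold Spec_heuristic_MOM; infer_instance

-- ===== CLAIM (what is proved, stated in full; the proofs are below) =====
def Claim_equal_heuristic_MOM : Prop := ∀ (clauses : List (List (String × Bool))) (assignment : List (String × Bool)), Dom_heuristic_MOM clauses assignment → Spec_heuristic_MOM clauses assignment (heuristic_MOM clauses assignment)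

-- ===== LEMMAS AND PROOFS =====

-- the unassigned-variable list of a clause that is neither satisfied nor a conflict
def activeOf (assignment : List (String × Bool)) (clause : List (String × Bool)) :
    Option (List String) :=
  let (un, sat) := amomScan assignment clause []
  if sat then none else if un.length = 0 then none else some un

def actives (assignment : List (String × Bool)) (clauses : List (List (String × Bool))) :
    List (List String) :=
  clauses.filterMap (activeOf assignment)

-- A's state transition restricted to active clauses
def stepA' (st : Option Nat × PySem.Dict String Int) (l : List String) :
    Option Nat × PySem.Dict String Int :=
  match st.1 with
  | none => (some l.length, pvBump PySem.Dict.empty l)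
  | some m =>
      if l.length < m then (some l.length, pvBump PySem.Dict.empty l)
      else if l.length = m then (some m, pvBump st.2 l)
      else st

def minFold (k : Nat) (L : List (List String)) : Nat :=
  L.foldl (fun m l => min m l.length) k

def foldOptMin (mo : Option Nat) (L : List (List String)) : Option Nat :=
  L.foldl (fun mo l =>
    match mo with
    | none => some l.length
    | some m => if l.length < m then some l.length else some m) mo

theorem minFold_le (L : List (List String)) : ∀ k, minFold k L ≤ k := by
  induction L with
  | nil => intro k; simp [minFold]
  | cons l L ih =>
      intro k
      have := ih (min k l.length)
      simp only [minFold, List.foldl_cons] at *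
      omega

theorem amomStep_eq (assignment : List (String × Bool))
    (st : Option Nat × PySem.Dict String Int) (clause : List (String × Bool)) :
    amomStep assignment st clause =
      match activeOf assignment clause with
      | none => st
      | some l => stepA' st l := by
  unfold amomStep activeOf stepA'
  rcases h : amomScan assignment clause [] with ⟨un, sat⟩
  cases sat <;> simp <;> split_ifs <;> rfl

theorem foldA_eq (assignment : List (String × Bool)) (clauses : List (List (String × Bool))) :
    ∀ st, clauses.foldl (amomStep assignment) st = (actives assignment clauses).foldl stepA' st := by
  induction clauses with
  | nil => intro st; rfl
  | cons c cs ih =>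
      intro st
      simp only [List.foldl_cons, amomStep_eq, actives, List.filterMap_cons]
      cases h : activeOf assignment c with
      | none => simpa [h] using ih st
      | some l => simpa [h] using ih (stepA' st l)

theorem foldG (L : List (List String)) : ∀ k d,
    L.foldl stepA' (some k, d) =
      (some (minFold k L),
       (L.filter (fun l => l.length = minFold k L)).foldl pvBump
         (if minFold k L = k then d else PySem.Dict.empty)) := by
  induction L with
  | nil => intro k d; simp [minFold]
  | cons l L ih =>
      intro k d
      have hmk : minFold k (l :: L) = minFold (min k l.length) L := rfl
      rcases Nat.lt_trichotomy l.length k with h | h | h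
      · -- new strict minimum: reset
        have hstep : stepA' (some k, d) l = (some l.length, pvBump PySem.Dict.empty l) := by
          simp [stepA', h]
        have hm : minFold k (l :: L) = minFold l.length L := by
          rw [hmk, Nat.min_eq_right (Nat.le_of_lt h)]
        have hle := minFold_le L l.length
        rw [List.foldl_cons, hstep, ih]
        rw [hm]
        by_cases he : minFold l.length L = l.length
        · have hk : minFold l.length L ≠ k := by omega
          have hk' : l.length ≠ k := Nat.ne_of_lt h
          simp [he, hk, hk', List.filter_cons]
        · have hk : minFold l.length L ≠ k := by omega
          have hne : l.length ≠ minFold l.length L := fun hh => he hh.symm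
          simp [hk, hne, he, List.filter_cons]
      · -- equal length: accumulate
        have hstep : stepA' (some k, d) l = (some k, pvBump d l) := by
          simp [stepA', h]
        have hm : minFold k (l :: L) = minFold k L := by
          rw [hmk, h, Nat.min_self]
        have hle := minFold_le L k
        rw [List.foldl_cons, hstep, ih, hm]
        by_cases he : minFold k L = k
        · simp [he, List.filter_cons, h, pvBump]
        · have : l.length ≠ minFold k L := by omega
          simp [he, this, List.filter_cons]
      · -- longer clause: state unchanged
        have hstep : stepA' (some k, d) l = (some k, d) := by
          simp only [stepA']
          split_ifs with h1 h2
          · omega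
          · omega
          · rfl
        have hm : minFold k (l :: L) = minFold k L := by
          rw [hmk, Nat.min_eq_left (Nat.le_of_lt h)]
        have hle := minFold_le L k
        rw [List.foldl_cons, hstep, ih, hm]
        have : l.length ≠ minFold k L := by omega
        simp [this, List.filter_cons]

-- scanning a clause: the satisfied flag is an 'any', the collected list is a filter+map
theorem amomScan_snd (assignment : List (String × Bool)) (clause : List (String × Bool)) :
    ∀ acc, (amomScan assignment clause acc).2 =
      clause.any (fun p => (pvAssignGet assignment p.1).any (fun b => b = p.2)) := by
  induction clause with
  | nil => intro acc; simp [amomScan]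
  | cons p rest ih =>
      intro acc
      rcases p with ⟨var, pol⟩
      cases h : pvAssignGet assignment var with
      | none => simp [amomScan, h, ih]
      | some b =>
          by_cases hb : b = pol
          · simp [amomScan, h, hb]
          · simp [amomScan, h, hb, ih]

theorem amomScan_fst (assignment : List (String × Bool)) (clause : List (String × Bool)) :
    ∀ acc, (amomScan assignment clause acc).2 = false →
      (amomScan assignment clause acc).1 =
        acc ++ (clause.filter (fun p => (pvAssignGet assignment p.1).isNone)).map (·.1) := by
  induction clause with
  | nil => intro acc _; simp [amomScan]
  | cons p rest ih =>
      intro acc hf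
      rcases p with ⟨var, pol⟩
      cases h : pvAssignGet assignment var with
      | none =>
          simp only [amomScan, h] at hf ⊢
          rw [ih _ hf]
          simp [h]
      | some b =>
          by_cases hb : b = pol
          · simp [amomScan, h, hb] at hf
          · simp only [amomScan, h, hb, if_false] at hf ⊢
            rw [ih _ hf]
            simp [h]

theorem bmomCollect_eq (assignment : List (String × Bool))
    (st : List (List String) × Option Nat) (clause : List (String × Bool)) :
    bmomCollect assignment st clause =
      match activeOf assignment clause with
      | none => st
      | some l =>
          (st.1 ++ [l],
           match st.2 with
           | none => some l.length
           | some m => if l.length < m then some l.length else some m) := by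
  unfold bmomCollect activeOf
  rcases h : amomScan assignment clause [] with ⟨un, sat⟩
  have hsnd := amomScan_snd assignment clause []
  rw [h] at hsnd
  cases sat with
  | true =>
      rw [← hsnd]
      simp
  | false =>
      have hfst := amomScan_fst assignment clause [] (by rw [h])
      rw [h] at hfst
      simp only [List.nil_append] at hfst
      rw [← hsnd, ← hfst]
      simp only [Bool.false_eq_true, if_false]
      by_cases hun : un = []
      · simp [hun]
      · simp [hun, List.isEmpty_iff, List.length_eq_zero_iff]

theorem foldB_eq (assignment : List (String × Bool)) (clauses : List (List (String × Bool))) :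
    ∀ acc mo, clauses.foldl (bmomCollect assignment) (acc, mo) =
      (acc ++ actives assignment clauses, foldOptMin mo (actives assignment clauses)) := by
  induction clauses with
  | nil => intro acc mo; simp [actives, foldOptMin]
  | cons c cs ih =>
      intro acc mo
      simp only [List.foldl_cons, bmomCollect_eq, actives, List.filterMap_cons]
      cases h : activeOf assignment c with
      | none => simpa [h] using ih acc mo
      | some l =>
          simp only [h]
          rw [ih (acc ++ [l])]
          simp [actives, foldOptMin, List.foldl_cons]

theorem foldOptMin_some (L : List (List String)) :
    ∀ k, foldOptMin (some k) L = some (minFold k L) := by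
  induction L with
  | nil => intro k; simp [foldOptMin, minFold]
  | cons l L ih =>
      intro k
      simp only [foldOptMin, List.foldl_cons, minFold] at *
      by_cases h : l.length < k
      · simpa [h, Nat.min_eq_right (Nat.le_of_lt h)] using ih l.length
      · simpa [h, Nat.min_eq_left (Nat.le_of_not_lt h)] using ih k

-- ===== VERDICT (by name: the statement is the Claim_ definition above) =====
theorem heuristic_MOM_spec : Claim_equal_heuristic_MOM := by
  intro clauses assignment _dom
  unfold Spec_heuristic_MOM heuristic_MOM heuristic_MOM_alt
  rw [foldA_eq]
  rw [foldB_eq]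
  cases hL : actives assignment clauses with
  | nil => simp [foldOptMin]
  | cons l L =>
      have hA : (l :: L).foldl stepA' (none, PySem.Dict.empty) =
          L.foldl stepA' (some l.length, pvBump PySem.Dict.empty l) := by
        simp [stepA']
      rw [hA, foldG]
      have hmin : foldOptMin none (l :: L) = some (minFold l.length L) := by
        have : foldOptMin none (l :: L) = foldOptMin (some l.length) L := rfl
        rw [this, foldOptMin_some]
      rw [hmin]
      have hle := minFold_le L l.length
      simp only [List.nil_append, Option.some.injEq]
      have hfun : (fun (d : PySem.Dict String Int) vs => if vs.length = minFold l.length L then pvBump d vs else d)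
          = fun d vs => if (fun vs : List String => decide (vs.length = minFold l.length L)) vs = true then pvBump d vs else d := by
        funext d vs; simp
      rw [hfun, ← List.foldl_filter]
      by_cases he : minFold l.length L = l.length
      · have hcons : (l :: L).filter (fun vs => decide (vs.length = minFold l.length L)) =
            l :: L.filter (fun vs => decide (vs.length = minFold l.length L)) := by
          simp [List.filter_cons, he]
        rw [hcons]
        simp [he, List.foldl_cons]
      · have hne : l.length ≠ minFold l.length L := fun hh => he hh.symm
        have hcons : (l :: L).filter (fun vs => decide (vs.length = minFold l.length L)) =
            L.filter (fun vs => decide (vs.length = minFold l.length L)) := by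
          simp [List.filter_cons, hne]
        rw [hcons]
        simp [he]
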